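-- pv_equiv track=rewrite | github.com/victormitra/biomedical | pages/1_Alignment_Tool.py | pretty_alignment
-- ===== SOURCE A (Python) =====
-- def pretty_alignment(seq1, seq2, width=60):
--     lines = []
--     for i in range(0, len(seq1), width):
--         s1 = seq1[i:i+width]
--         s2 = seq2[i:i+width]
--         match_line = ''.join('|' if a == b else ' ' for a, b in zip(s1, s2))
--
--         lines.append(f"Seq1: {s1}")
--         lines.append(f"      {match_line}")
--         lines.append(f"Seq2: {s2}")
--         lines.append("")
--     return "\n".join(lines)
-- ===== SOURCE B (Python) =====
-- def pretty_alignment(seq1, seq2, width=60):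
--     if width <= 0 or not seq1:
--         return ""
--     nblocks = -(-len(seq1) // width)
--
--     def line(j):
--         i = (j // 4) * width
--         r = j % 4
--         if r == 0:
--             return "Seq1: " + seq1[i:i+width]
--         if r == 1:
--             return "      " + ''.join('|' if a == b else ' '
--                                       for a, b in zip(seq1[i:i+width], seq2[i:i+width]))
--         if r == 2:
--             return "Seq2: " + seq2[i:i+width]
--         return ""
--
--     return "\n".join(line(j) for j in range(4 * nblocks))
-- ===== Notes on version B (the rewrite author's own statement) =====
-- stated objective: alternative
-- what changed: B replaces A's chunk loop that appends four lines per iteration by a flat arithmetical formulation: it computes the block count by ceiling division and generates each of the 4*nblocks output lines directly from its line index j (chunk j//4, role j%4), joining them once.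
import Mathlib
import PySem

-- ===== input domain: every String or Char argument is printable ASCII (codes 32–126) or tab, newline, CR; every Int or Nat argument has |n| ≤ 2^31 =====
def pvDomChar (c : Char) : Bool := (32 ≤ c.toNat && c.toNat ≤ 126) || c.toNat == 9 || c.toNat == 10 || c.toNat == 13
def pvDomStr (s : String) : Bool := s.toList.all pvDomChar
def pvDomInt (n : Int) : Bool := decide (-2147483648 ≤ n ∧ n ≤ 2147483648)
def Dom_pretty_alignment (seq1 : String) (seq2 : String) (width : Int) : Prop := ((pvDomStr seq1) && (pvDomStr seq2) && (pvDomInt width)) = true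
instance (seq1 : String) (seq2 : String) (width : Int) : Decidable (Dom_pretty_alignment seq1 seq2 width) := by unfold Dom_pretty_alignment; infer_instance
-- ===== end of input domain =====

-- B emits each output line directly from its line index (chunk j//4, role j%4)
-- over a ceiling-division block count, instead of A's chunk loop appending four
-- lines per iteration; same O(n) cost, a different (flat, arithmetical) decomposition.


-- ===== PORT A =====
-- literal transliteration of A: per chunk index i of range(0, len, width), slice
-- both sequences, build the match line by zipping the two slices, append four
-- separate lines, join with "\n".
def pretty_alignment (seq1 : String) (seq2 : String) (width : Int) : String :=
  let l1 := seq1.toList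
  let l2 := seq2.toList
  let lines : List (List Char) :=
    (PySem.List.pyRange 0 (l1.length : Int) width).foldl
      (fun lines i =>
        let s1 := PySem.List.slice l1 (some i) (some (i + width))
        let s2 := PySem.List.slice l2 (some i) (some (i + width))
        let matchLine := (s1.zip s2).map (fun p => if p.1 = p.2 then '|' else ' ')
        lines ++ ["Seq1: ".toList ++ s1,
                  "      ".toList ++ matchLine,
                  "Seq2: ".toList ++ s2,
                  []])
      []
  String.ofList (PySem.Chars.join ['\n'] lines)

-- ===== PORT B =====
-- literal transliteration of B's helper `line(j)`: chunk offset i = (j // 4) * width,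
-- role r = j % 4 selects which of the four lines of a block index j names.
def pa_line (l1 l2 : List Char) (width j : Int) : List Char :=
  let i := PySem.Int.floordiv j 4 * width
  let r := PySem.Int.mod j 4
  if r = 0 then
    "Seq1: ".toList ++ PySem.List.slice l1 (some i) (some (i + width))
  else if r = 1 then
    "      ".toList ++
      ((PySem.List.slice l1 (some i) (some (i + width))).zip
        (PySem.List.slice l2 (some i) (some (i + width)))).map
        (fun p => if p.1 = p.2 then '|' else ' ')
  else if r = 2 then
    "Seq2: ".toList ++ PySem.List.slice l2 (some i) (some (i + width))
  else []

-- literal transliteration of B: guard, ceiling-division block count, one flat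
-- range over all 4*nblocks line indices, joined once.
def pretty_alignment_alt (seq1 : String) (seq2 : String) (width : Int) : String :=
  let l1 := seq1.toList
  let l2 := seq2.toList
  if width ≤ 0 ∨ l1 = [] then String.ofList []
  else
    let nblocks := -(PySem.Int.floordiv (-(l1.length : Int)) width)
    String.ofList (PySem.Chars.join ['\n']
      ((PySem.List.pyRange 0 (4 * nblocks) 1).map (pa_line l1 l2 width)))

-- ===== PRECONDITION & SPEC =====
-- Pre_ excludes exactly width = 0, on which Python's range(0, len, 0) raises ValueError.
def Pre_pretty_alignment (seq1 : String) (seq2 : String) (width : Int) : Prop := width ≠ 0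
instance (seq1 : String) (seq2 : String) (width : Int) : Decidable (Pre_pretty_alignment seq1 seq2 width) := by unfold Pre_pretty_alignment; infer_instance
def pvWitness_pretty_alignment : String × String × Int := ("ACGTAC", "ACCTAG", 4)
def Spec_pretty_alignment (seq1 : String) (seq2 : String) (width : Int) (out : String) : Prop := out = pretty_alignment_alt seq1 seq2 width
instance (seq1 : String) (seq2 : String) (width : Int) (out : String) : Decidable (Spec_pretty_alignment seq1 seq2 width out) := by unfold Spec_pretty_alignment; infer_instance

-- ===== CLAIM (what is proved, stated in full; the proofs are below) =====
def Claim_equal_pretty_alignment : Prop := ∀ (seq1 : String) (seq2 : String) (width : Int), Dom_pretty_alignment seq1 seq2 width → Pre_pretty_alignment seq1 seq2 width → Spec_pretty_alignment seq1 seq2 width (pretty_alignment seq1 seq2 width)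
-- ===== LEMMAS AND PROOFS =====

-- ceiling division: B's -((-n) // w) equals the chunk count (n + w - 1) / w of
-- pyRange_of_pos, for positive w and nonnegative n
theorem pv_ceil_eq (n w : Int) (hw : 0 < w) (hn : 0 ≤ n) :
    -(PySem.Int.floordiv (-n) w) = (n + w - 1) / w := by
  rw [PySem.Int.neg_floordiv_neg_eq_iff_of_pos hw]
  have hdm := Int.mul_ediv_add_emod (n + w - 1) w
  have hlt := Int.emod_lt_of_pos (n + w - 1) hw
  have hge := Int.emod_nonneg (n + w - 1) (ne_of_gt hw)
  have hc : w * ((n + w - 1) / w) = ((n + w - 1) / w) * w := mul_comm _ _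
  constructor <;> nlinarith [hdm, hlt, hge, hc]

-- the four roles of B's line(j) at j = 4k, 4k+1, 4k+2, 4k+3 (k ≥ 0)
theorem pv_line_roles (l1 l2 : List Char) (w : Int) (k : Nat) :
    pa_line l1 l2 w (4 * (k : Int)) =
      "Seq1: ".toList ++ PySem.List.slice l1 (some ((k : Int) * w)) (some ((k : Int) * w + w)) ∧
    pa_line l1 l2 w (4 * (k : Int) + 1) =
      "      ".toList ++
        ((PySem.List.slice l1 (some ((k : Int) * w)) (some ((k : Int) * w + w))).zip
          (PySem.List.slice l2 (some ((k : Int) * w)) (some ((k : Int) * w + w)))).map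
          (fun p => if p.1 = p.2 then '|' else ' ') ∧
    pa_line l1 l2 w (4 * (k : Int) + 2) =
      "Seq2: ".toList ++ PySem.List.slice l2 (some ((k : Int) * w)) (some ((k : Int) * w + w)) ∧
    pa_line l1 l2 w (4 * (k : Int) + 3) = [] := by
  have h4 : (0:Int) < 4 := by norm_num
  refine ⟨?_, ?_, ?_, ?_⟩ <;>
  · simp only [pa_line, PySem.Int.floordiv_eq_ediv_of_pos h4, PySem.Int.mod_eq_emod_of_pos h4]
    have hd : ∀ r : Int, 0 ≤ r → r < 4 → (4 * (k : Int) + r) / 4 = (k : Int) ∧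
        (4 * (k : Int) + r) % 4 = r := by intro r h1 h2; omega
    first
      | (obtain ⟨he, hm⟩ := hd 0 (by omega) (by omega); simp only [add_zero] at he hm;
         rw [he, hm]; norm_num)
      | (obtain ⟨he, hm⟩ := hd 1 (by omega) (by omega); rw [he, hm]; norm_num)
      | (obtain ⟨he, hm⟩ := hd 2 (by omega) (by omega); rw [he, hm]; norm_num)
      | (obtain ⟨he, hm⟩ := hd 3 (by omega) (by omega); rw [he, hm]; norm_num)

-- B's flat range over 4*nb line indices, regrouped into blocks of four lines
theorem pv_flat_regroup (l1 l2 : List Char) (w : Int) (nb : Nat) :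
    (PySem.List.pyRange 0 (4 * (nb : Int)) 1).map (pa_line l1 l2 w) =
    (List.range nb).flatMap (fun (k : Nat) =>
      [pa_line l1 l2 w (4 * (k : Int)), pa_line l1 l2 w (4 * (k : Int) + 1),
       pa_line l1 l2 w (4 * (k : Int) + 2), pa_line l1 l2 w (4 * (k : Int) + 3)]) := by
  induction nb with
  | zero => simp [PySem.List.pyRange_one_eq_nil]
  | succ m ih =>
    have h1 : (4 : Int) * ((m + 1 : Nat) : Int) = (4 * (m : Int) + 1 + 1 + 1) + 1 := by
      push_cast; ring
    rw [h1, PySem.List.pyRange_one_succ_right (by positivity),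
        PySem.List.pyRange_one_succ_right (by positivity),
        PySem.List.pyRange_one_succ_right (by positivity),
        PySem.List.pyRange_one_succ_right (by positivity),
        List.range_succ]
    simp only [List.map_append, List.flatMap_append, ih, List.map_cons, List.map_nil,
      List.flatMap_cons, List.flatMap_nil]
    simp [List.append_assoc, show (4*(m:Int)+1+1) = 4*(m:Int)+2 from by ring,
          show (4*(m:Int)+2+1) = 4*(m:Int)+3 from by ring]

-- empty pyRange for a negative step and nonnegative stop (A's range with width < 0)
theorem pv_pyRange_neg_step (n w : Int) (hw : w < 0) (hn : 0 ≤ n) :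
    PySem.List.pyRange 0 n w = [] := by
  simp only [PySem.List.pyRange]
  have h1 : w ≠ 0 := by omega
  have h2 : ¬ (0 < w) := by omega
  have h3 : ¬ (n < 0) := by omega
  simp [h1, h2, h3]

-- ===== VERDICT (by name: the statement is the Claim_ definition above) =====
theorem pretty_alignment_spec : Claim_equal_pretty_alignment := by
  intro seq1 seq2 width _ hpre
  unfold Spec_pretty_alignment pretty_alignment pretty_alignment_alt
  dsimp only
  generalize seq1.toList = l1
  generalize seq2.toList = l2
  rcases lt_trichotomy width 0 with hneg | hz | hpos
  · -- width < 0: A's range is empty, B's guard fires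
    rw [pv_pyRange_neg_step _ _ hneg (by positivity)]
    simp [hneg.le]
  · exact absurd hz hpre
  · -- width > 0
    by_cases he : l1 = []
    · subst he
      have h00 : PySem.List.pyRange 0 ((List.length ([] : List Char) : Int)) width = [] := by
        simp [PySem.List.pyRange]
      rw [h00]
      simp [not_le.mpr hpos]
    · have hguard : ¬ (width ≤ 0 ∨ l1 = []) := by
        exact fun h => h.elim (absurd hpos ∘ not_lt.mpr) he
      simp only [if_neg hguard]
      set n : Int := (l1.length : Int) with hn
      have hn0 : 0 < n := by
        simp only [hn]
        exact_mod_cast List.length_pos_iff.mpr he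
      -- B's block count = pyRange_of_pos's count
      rw [pv_ceil_eq n width hpos hn0.le]
      set nb : Nat := ((n + width - 1) / width).toNat with hnb
      have hnbc : (n + width - 1) / width = (nb : Int) := by
        rw [hnb, Int.toNat_of_nonneg]
        exact Int.ediv_nonneg (by omega) hpos.le
      rw [hnbc]
      -- A: foldl → flatMap of 4-line groups over pyRange 0 n width
      rw [PySem.List.foldl_append_eq_flatMap, List.nil_append,
          PySem.List.pyRange_of_pos 0 n hpos, if_pos hn0]
      rw [show n - 0 + width - 1 = n + width - 1 by ring, hnbc, Int.toNat_natCast,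
          List.flatMap_map]
      -- B: flat map over 4*nb indices regrouped into the same 4-line groups
      rw [pv_flat_regroup l1 l2 width nb]
      congr 2
      refine congrArg (List.range nb).flatMap (funext fun k => ?_)
      show _ = [pa_line l1 l2 width (4 * (k : Int)), pa_line l1 l2 width (4 * (k : Int) + 1),
                pa_line l1 l2 width (4 * (k : Int) + 2), pa_line l1 l2 width (4 * (k : Int) + 3)]
      obtain ⟨r0, r1, r2, r3⟩ := pv_line_roles l1 l2 width k
      rw [r0, r1, r2, r3]
      simp only [zero_add, mul_comm (k : Int) width]
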